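-- pv_equiv track=rewrite | github.com/arthurltsdev/supabase-py | listar_tabelas.py | match_tabela_fk
-- ===== SOURCE A (Python) =====
-- def match_tabela_fk(nome_coluna, tabelas):
--     """Tenta encontrar a tabela de destino para a coluna FK, considerando singular/plural."""
--     if not nome_coluna.startswith("id_"):
--         return None
--     sufixo = nome_coluna[3:]
--     for t in tabelas:
--         if sufixo == t:
--             return t
--         if sufixo + "s" == t:
--             return t
--         if sufixo.endswith("s") and sufixo[:-1] == t:
--             return t
--         # Também aceita se o nome da tabela for o plural do sufixo
--         if t.endswith("s") and t[:-1] == sufixo: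
--             return t
--     return None
-- ===== SOURCE B (Python) =====
-- def match_tabela_fk(nome_coluna, tabelas):
--     """Index-based: build a first-occurrence position map of tabelas once, look up the
--     candidate target names in it, and return the table at the smallest hit position."""
--     if not nome_coluna.startswith("id_"):
--         return None
--     sufixo = nome_coluna[3:]
--     pos = {}
--     for i, t in enumerate(tabelas):
--         pos.setdefault(t, i)
--     cands = [sufixo, sufixo + "s"]
--     if sufixo.endswith("s"):
--         cands.append(sufixo[:-1])
--     hits = [pos[c] for c in cands if c in pos]
--     if not hits:
--         return None
--     return tabelas[min(hits)]
-- ===== Notes on version B (the rewrite author's own statement) =====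
-- stated objective: alternative
-- what changed: B inverts the search: instead of scanning tabelas and testing four name conditions per table, it builds a first-occurrence position map of tabelas once, looks up the (at most three) acceptable target names in it, and returns the table at the smallest hit index; A's fourth condition is the same as its second, so no extra candidate is needed.
import Mathlib
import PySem

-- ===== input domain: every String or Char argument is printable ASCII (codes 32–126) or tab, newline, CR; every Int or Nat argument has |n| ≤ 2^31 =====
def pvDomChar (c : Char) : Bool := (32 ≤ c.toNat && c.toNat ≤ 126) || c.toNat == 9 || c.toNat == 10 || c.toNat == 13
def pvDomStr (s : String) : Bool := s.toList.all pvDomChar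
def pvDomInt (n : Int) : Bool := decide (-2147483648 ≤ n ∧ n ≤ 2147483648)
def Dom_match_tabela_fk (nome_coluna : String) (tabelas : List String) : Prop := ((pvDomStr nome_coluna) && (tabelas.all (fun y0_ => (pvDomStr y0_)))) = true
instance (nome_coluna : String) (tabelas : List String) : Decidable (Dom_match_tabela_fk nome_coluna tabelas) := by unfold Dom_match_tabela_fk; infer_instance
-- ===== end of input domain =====

-- B inverts the search: it builds a first-occurrence position map of tabelas once, looks the
-- candidate target names up in it and returns the table at the smallest hit index, instead of
-- A's per-table four-way comparison scan (objective: alternative, same asymptotic cost).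

-- ===== PORT A =====
-- A's for-loop over tabelas with its four conditions, in order.
def pvLoopA (sufixo : List Char) : List String → Option String
  | [] => none
  | t :: ts =>
    if sufixo = t.toList then some t
    else if sufixo ++ ['s'] = t.toList then some t
    else if PySem.Chars.endswith sufixo ['s'] = true ∧ PySem.List.slice sufixo none (some (-1)) = t.toList then some t
    else if PySem.Chars.endswith t.toList ['s'] = true ∧ PySem.List.slice t.toList none (some (-1)) = sufixo then some t
    else pvLoopA sufixo ts

def match_tabela_fk (nome_coluna : String) (tabelas : List String) : Option String :=
  if ¬ (PySem.Str.startswith nome_coluna "id_" = true) then none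
  else pvLoopA (PySem.Str.slice nome_coluna (some 3) none).toList tabelas

-- ===== PORT B =====
-- pos = {}; for i, t in enumerate(tabelas): pos.setdefault(t, i)
def pvPos (tabelas : List String) : PySem.Dict (List Char) Int :=
  (PySem.List.enumerate tabelas).foldl (fun d p => PySem.Dict.setdefault d p.2.toList p.1) PySem.Dict.empty

-- cands = [sufixo, sufixo + "s"] (+ [sufixo[:-1]] if sufixo ends with "s")
def pvCands (sufixo : List Char) : List (List Char) :=
  [sufixo, sufixo ++ ['s']] ++
    (if PySem.Chars.endswith sufixo ['s'] = true then [PySem.List.slice sufixo none (some (-1))] else [])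

def match_tabela_fk_alt (nome_coluna : String) (tabelas : List String) : Option String :=
  if ¬ (PySem.Str.startswith nome_coluna "id_" = true) then none
  else
    let sufixo := (PySem.Str.slice nome_coluna (some 3) none).toList
    let pos := pvPos tabelas
    let hits := (pvCands sufixo).filterMap (fun c => pos.get? c)   -- [pos[c] for c in cands if c in pos]
    match PySem.List.min? hits (fun x => x) with
    | none => none                                                 -- if not hits: return None
    | some i => PySem.List.pyGet? tabelas i                        -- return tabelas[min(hits)]

-- ===== PRECONDITION & SPEC =====
def Spec_match_tabela_fk (nome_coluna : String) (tabelas : List String) (out : Option String) : Prop := out = match_tabela_fk_alt nome_coluna tabelas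
instance (nome_coluna : String) (tabelas : List String) (out : Option String) : Decidable (Spec_match_tabela_fk nome_coluna tabelas out) := by unfold Spec_match_tabela_fk; infer_instance

-- ===== CLAIM (what is proved, stated in full; the proofs are below) =====
def Claim_equal_match_tabela_fk : Prop := ∀ (nome_coluna : String) (tabelas : List String), Dom_match_tabela_fk nome_coluna tabelas → Spec_match_tabela_fk nome_coluna tabelas (match_tabela_fk nome_coluna tabelas)

-- ===== LEMMAS AND PROOFS =====

-- A's fourth condition is exactly "t = sufixo + 's'" (condition 2).
lemma pv_cond4_iff (l sufixo : List Char) :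
    (PySem.Chars.endswith l ['s'] = true ∧ PySem.List.slice l none (some (-1)) = sufixo) ↔ l = sufixo ++ ['s'] := by
  rw [PySem.Chars.endswith_iff, PySem.List.slice_to_neg_one]
  constructor
  · rintro ⟨⟨p, rfl⟩, h⟩
    simp at h
    subst h; rfl
  · rintro rfl
    exact ⟨⟨sufixo, rfl⟩, by simp⟩

-- membership in the candidate list, spelled out
lemma pv_mem_cands (sufixo l : List Char) :
    l ∈ pvCands sufixo ↔
      (l = sufixo ∨ l = sufixo ++ ['s'] ∨
        (PySem.Chars.endswith sufixo ['s'] = true ∧ l = PySem.List.slice sufixo none (some (-1)))) := by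
  unfold pvCands
  split
  · rename_i h; simp [h]
  · rename_i h; simp [h]

-- A's loop finds the first table whose name is in the candidate list
lemma pv_loop_eq_find (sufixo : List Char) (ts : List String) :
    pvLoopA sufixo ts = ts.find? (fun t => decide (t.toList ∈ pvCands sufixo)) := by
  induction ts with
  | nil => rfl
  | cons t ts ih =>
    by_cases hmem : t.toList ∈ pvCands sufixo
    · have hd : decide (t.toList ∈ pvCands sufixo) = true := by simpa using hmem
      rw [pvLoopA]
      simp only [List.find?_cons, hd]
      have hm := (pv_mem_cands sufixo t.toList).mp hmem
      split_ifs with h1 h2 h3 h4 <;> try rfl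
      exfalso
      rcases hm with h | h | ⟨ha, hb⟩
      · exact h1 h.symm
      · exact h2 h.symm
      · exact h3 ⟨ha, hb.symm⟩
    · have hd : decide (t.toList ∈ pvCands sufixo) = false := by simpa using hmem
      rw [pvLoopA]
      simp only [List.find?_cons, hd]
      have h := (not_iff_not.mpr (pv_mem_cands sufixo t.toList)).mp hmem
      push Not at h
      obtain ⟨h1, h2, h3⟩ := h
      rw [if_neg (fun e => h1 e.symm), if_neg (fun e => h2 e.symm), if_neg, if_neg]
      · exact ih
      · intro hc
        exact h2 ((pv_cond4_iff t.toList sufixo).mp hc)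
      · rintro ⟨hs, hd⟩
        exact h3 hs hd.symm

-- the position dict holds the first-occurrence index of each table name
lemma pv_pos_get_gen (c : List Char) (ts : List String) (s : Int) (d : PySem.Dict (List Char) Int) :
    ((PySem.List.enumerate ts s).foldl (fun d p => PySem.Dict.setdefault d p.2.toList p.1) d).get? c
      = if d.contains c then d.get? c
        else (PySem.List.index? (ts.map String.toList) c).map (fun n => (n : Int) + s) := by
  induction ts generalizing s d with
  | nil =>
    simp only [PySem.List.enumerate_nil, List.foldl_nil, List.map_nil]
    by_cases hc : d.contains c = true
    · rw [if_pos hc]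
    · rw [if_neg hc]
      rw [PySem.Dict.contains_eq_isSome_get?] at hc
      cases h : d.get? c with
      | none => simp
      | some v => rw [h] at hc; simp at hc
  | cons t ts ih =>
    rw [PySem.List.enumerate_cons, List.foldl_cons, ih]
    by_cases hc : d.contains c = true
    · rw [if_pos (by simp [PySem.Dict.contains_setdefault, hc]), if_pos hc]
      by_cases he : c = t.toList
      · rw [he]; rw [he] at hc
        rw [PySem.Dict.get?_setdefault_self]
        rw [PySem.Dict.contains_eq_isSome_get?] at hc
        cases hg : d.get? t.toList with
        | none => rw [hg] at hc; simp at hc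
        | some v => simp
      · exact PySem.Dict.get?_setdefault_of_ne d s he
    · have hg : d.get? c = none := by
        rw [PySem.Dict.contains_eq_isSome_get?] at hc
        cases h : d.get? c with
        | none => rfl
        | some v => rw [h] at hc; simp at hc
      rw [if_neg hc]
      by_cases he : c = t.toList
      · rw [if_pos (by simp [PySem.Dict.contains_setdefault, he])]
        rw [he]; rw [he] at hg
        rw [PySem.Dict.get?_setdefault_self, hg]
        rw [List.map_cons, ← he, he, PySem.List.index?_cons_self]
        simp
      · rw [if_neg (by simp [PySem.Dict.contains_setdefault, hc]; exact fun e => he (by simp [e]))]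
        rw [List.map_cons, PySem.List.index?_cons_of_ne (ts.map String.toList) (fun e => he e.symm)]
        cases PySem.List.index? (ts.map String.toList) c with
        | none => simp
        | some n =>
          simp
          ring

lemma pv_pos_get (c : List Char) (ts : List String) :
    (pvPos ts).get? c = (PySem.List.index? (ts.map String.toList) c).map (fun n => (n : Int)) := by
  unfold pvPos
  rw [pv_pos_get_gen]
  simp [PySem.Dict.contains_empty]

-- the first minimal element of a (+1)-shifted list is the shifted first minimal element
lemma pv_min_map_succ (xs : List Int) :
    PySem.List.min? (xs.map (fun x => x + 1)) (fun x => x) = (PySem.List.min? xs (fun x => x)).map (fun x => x + 1) := by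
  cases xs with
  | nil => rfl
  | cons x t =>
    rw [List.map_cons, PySem.List.min?_id_cons, PySem.List.min?_id_cons, Option.map_some]
    congr 1
    induction t generalizing x with
    | nil => rfl
    | cons y t ih =>
      rw [List.map_cons, List.foldl_cons, List.foldl_cons, ← ih]
      congr 1
      omega

-- the hit list of B, rewritten through pv_pos_get: first-occurrence indices of the candidates
def pvHits (cs : List (List Char)) (ts : List String) : List Int :=
  cs.filterMap (fun c => (PySem.List.index? (ts.map String.toList) c).map (fun n => (n : Int)))

lemma pv_hits_nonneg (cs : List (List Char)) (ts : List String) :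
    ∀ x ∈ pvHits cs ts, 0 ≤ x := by
  intro x hx
  unfold pvHits at hx
  obtain ⟨c, _, hc⟩ := List.mem_filterMap.mp hx
  cases h : PySem.List.index? (ts.map String.toList) c with
  | none => rw [h] at hc; simp at hc
  | some n => rw [h] at hc; simp at hc; omega

lemma pv_hits_cons_mem (cs : List (List Char)) (t : String) (ts : List String)
    (hmem : t.toList ∈ cs) : (0 : Int) ∈ pvHits cs (t :: ts) := by
  unfold pvHits
  refine List.mem_filterMap.mpr ⟨t.toList, hmem, ?_⟩
  rw [List.map_cons, PySem.List.index?_cons_self]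
  rfl

lemma pv_hits_cons_not_mem (cs : List (List Char)) (t : String) (ts : List String)
    (hmem : t.toList ∉ cs) : pvHits cs (t :: ts) = (pvHits cs ts).map (fun x => x + 1) := by
  unfold pvHits
  rw [List.map_filterMap]
  apply List.filterMap_congr
  intro c hc
  have hne : t.toList ≠ c := fun e => hmem (e ▸ hc)
  rw [List.map_cons, PySem.List.index?_cons_of_ne (ts.map String.toList) hne]
  cases PySem.List.index? (ts.map String.toList) c with
  | none => simp
  | some n => simp

-- B's min-index lookup computes exactly the first table whose name is a candidate
lemma pv_min_index_eq_find (cs : List (List Char)) (ts : List String) :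
    (match PySem.List.min? (pvHits cs ts) (fun x => x) with
      | none => none
      | some i => PySem.List.pyGet? ts i)
    = ts.find? (fun t => decide (t.toList ∈ cs)) := by
  induction ts with
  | nil =>
    have h : pvHits cs [] = [] := by unfold pvHits; simp
    rw [h]
    rfl
  | cons t ts ih =>
    by_cases hmem : t.toList ∈ cs
    · have hd : decide (t.toList ∈ cs) = true := by simpa using hmem
      simp only [List.find?_cons, hd]
      have h0 : (0 : Int) ∈ pvHits cs (t :: ts) := pv_hits_cons_mem cs t ts hmem
      cases hmin : PySem.List.min? (pvHits cs (t :: ts)) (fun x => x) with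
      | none =>
        rw [PySem.List.min?_eq_none_iff] at hmin
        rw [hmin] at h0; simp at h0
      | some m =>
        have hle : m ≤ 0 := PySem.List.min?_isMin hmin 0 h0
        have hge : 0 ≤ m := pv_hits_nonneg _ _ m (PySem.List.min?_mem hmin)
        have hm0 : m = 0 := by omega
        subst hm0
        simp
    · have hd : decide (t.toList ∈ cs) = false := by simpa using hmem
      simp only [List.find?_cons, hd]
      rw [← ih, pv_hits_cons_not_mem cs t ts hmem, pv_min_map_succ]
      cases hmin : PySem.List.min? (pvHits cs ts) (fun x => x) with
      | none => rfl
      | some m =>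
        simp only [Option.map_some]
        have hge : 0 ≤ m := pv_hits_nonneg _ _ m (PySem.List.min?_mem hmin)
        rw [PySem.List.pyGet?_of_nonneg (t :: ts) (by omega : (0:Int) ≤ m + 1), PySem.List.pyGet?_of_nonneg ts hge]
        have ht : (m + 1).toNat = m.toNat + 1 := by omega
        rw [ht, List.getElem?_cons_succ]

-- ===== VERDICT (by name: the statement is the Claim_ definition above) =====
theorem match_tabela_fk_spec : Claim_equal_match_tabela_fk := by
  intro nc tabelas _
  unfold Spec_match_tabela_fk match_tabela_fk match_tabela_fk_alt
  split
  · rfl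
  · rw [pv_loop_eq_find]
    have hh : (pvCands ((PySem.Str.slice nc (some 3) none)).toList).filterMap
        (fun c => (pvPos tabelas).get? c)
        = pvHits (pvCands ((PySem.Str.slice nc (some 3) none)).toList) tabelas := by
      unfold pvHits
      exact List.filterMap_congr (fun c _ => pv_pos_get c tabelas)
    simp only [hh]
    exact (pv_min_index_eq_find _ _).symm
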